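-- pv_equiv track=rewrite | github.com/guastti-py/conferencia-contratos-python | ConferenciApp/parceiros/parceiro_c.py | _normalizar_contrato_parceiro_c
-- ===== SOURCE A (Python) =====
-- def _normalizar_contrato_parceiro_c(valor):
--     """
--     Normaliza contrato/CCB da PARCEIRO Z para comparação.
--
--     Exemplos:
--     A7730858-000 -> A7730858
--     A7730858     -> A7730858
--     a7730858/000 -> A7730858
--     7730858      -> 7730858
--     """
--     if valor is None:
--         return ""
--
--     texto = str(valor).strip().upper()
--
--     if not texto:
--         return ""
--
--     # remove .0 vindo do Excel
--     if texto.endswith(".0"):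
--         texto = texto[:-2]
--
--     # remove espaços
--     texto = texto.replace(" ", "")
--
--     # tira tudo depois de hífen ou barra
--     texto = texto.split("-")[0]
--     texto = texto.split("/")[0]
--
--     # mantém só letras e números
--     texto = "".join(ch for ch in texto if ch.isalnum())
--
--     return texto
-- ===== SOURCE B (Python) =====
-- def _normalizar_contrato_parceiro_c(valor):
--     """One forward pass: break at the first '-' or '/', keep only alphanumerics."""
--     if valor is None:
--         return ""
--
--     texto = str(valor).strip().upper()
--
--     if not texto:
--         return ""
--
--     if texto.endswith(".0"):
--         texto = texto[:-2]
--
--     out = []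
--     for ch in texto:
--         if ch == "-" or ch == "/":
--             break
--         if ch.isalnum():
--             out.append(ch)
--     return "".join(out)
-- ===== Notes on version B (the rewrite author's own statement) =====
-- stated objective: simpler
-- what changed: Replaces the chain of whole-string passes (replace(' ',''), split('-')[0], split('/')[0], alnum comprehension) with a single forward loop that breaks at the first '-' or '/' and appends only alphanumeric characters.
import Mathlib
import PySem

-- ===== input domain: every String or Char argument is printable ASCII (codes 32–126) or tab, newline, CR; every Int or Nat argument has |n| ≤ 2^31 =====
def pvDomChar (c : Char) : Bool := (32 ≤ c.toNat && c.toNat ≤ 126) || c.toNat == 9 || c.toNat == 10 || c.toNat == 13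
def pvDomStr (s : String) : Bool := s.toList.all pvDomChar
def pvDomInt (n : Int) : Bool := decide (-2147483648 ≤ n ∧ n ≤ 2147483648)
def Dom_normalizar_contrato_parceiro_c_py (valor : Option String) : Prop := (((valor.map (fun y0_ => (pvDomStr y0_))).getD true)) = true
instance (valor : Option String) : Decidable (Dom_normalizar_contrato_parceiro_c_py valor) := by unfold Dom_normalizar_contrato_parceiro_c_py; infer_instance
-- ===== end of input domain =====

-- B fuses A's sequential whole-string passes into one early-breaking forward loop (objective: simpler).

-- ===== PORT A =====
def normalizar_contrato_parceiro_c_py (valor : Option String) : String :=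
  match valor with
  | none => ""
  | some v =>
    let texto := PySem.Chars.upper (PySem.Chars.strip v.toList)
    if texto.length == 0 then ""
    else
      let texto := if PySem.Chars.endswith texto ['.', '0'] then PySem.Chars.slice texto none (some (-2)) else texto
      let texto := PySem.Chars.replace texto [' '] []
      -- split(…)[0]: the split result is always non-empty, so Python's [0] is headD
      let texto := (PySem.Chars.splitOn texto ['-']).headD []
      let texto := (PySem.Chars.splitOn texto ['/']).headD []
      String.mk (PySem.Chars.join [] ((texto.filter (fun ch => PySem.Chars.isalnum ch)).map (fun ch => [ch])))

-- ===== PORT B =====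
-- the for-loop of Source B with its break, as structural recursion over the characters
def pvAltLoop : List Char → List Char
  | [] => []
  | c :: rest =>
    if c == '-' || c == '/' then []
    else if PySem.Chars.isalnum c then c :: pvAltLoop rest else pvAltLoop rest

def normalizar_contrato_parceiro_c_py_alt (valor : Option String) : String :=
  match valor with
  | none => ""
  | some v =>
    let texto := PySem.Chars.upper (PySem.Chars.strip v.toList)
    if texto.length == 0 then ""
    else
      let texto := if PySem.Chars.endswith texto ['.', '0'] then PySem.Chars.slice texto none (some (-2)) else texto
      String.mk (pvAltLoop texto)

-- ===== PRECONDITION & SPEC =====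
def Spec_normalizar_contrato_parceiro_c_py (valor : Option String) (out : String) : Prop := out = normalizar_contrato_parceiro_c_py_alt valor
instance (valor : Option String) (out : String) : Decidable (Spec_normalizar_contrato_parceiro_c_py valor out) := by unfold Spec_normalizar_contrato_parceiro_c_py; infer_instance

-- ===== CLAIM (what is proved, stated in full; the proofs are below) =====
def Claim_equal_normalizar_contrato_parceiro_c_py : Prop := ∀ (valor : Option String), Dom_normalizar_contrato_parceiro_c_py valor → Spec_normalizar_contrato_parceiro_c_py valor (normalizar_contrato_parceiro_c_py valor)

-- ===== LEMMAS AND PROOFS =====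

-- replace(" ", "") is a filter
lemma pv_replace_go_space (l : List Char) : ∀ (fuel : Nat) (acc : List Char), l.length ≤ fuel →
    PySem.Chars.replace.go [' '] [] fuel l acc = acc.reverse ++ l.filter (fun c => c != ' ') := by
  induction l with
  | nil =>
    intro fuel acc _
    cases fuel <;> simp [PySem.Chars.replace.go]
  | cons c t ih =>
    intro fuel acc h
    cases fuel with
    | zero => simp at h
    | succ f =>
      by_cases hc : c = ' '
      · subst hc
        simp only [PySem.Chars.replace.go, List.isPrefixOf]
        simp [ih f acc (by simpa using h)]
      · have : (List.isPrefixOf [' '] (c :: t)) = false := by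
          simp [List.isPrefixOf]; intro h'; exact hc h'.symm
        simp only [PySem.Chars.replace.go, this]
        simp [ih f (c :: acc) (by simpa using h), hc]

lemma pv_replace_space (l : List Char) :
    PySem.Chars.replace l [' '] [] = l.filter (fun c => c != ' ') := by
  simp [PySem.Chars.replace, pv_replace_go_space l l.length [] (le_refl _)]

-- splitOn.go's accumulator just prepends (reversed)
lemma pv_splitOn_go_acc (sep : List Char) : ∀ (fuel : Nat) (l cur : List Char) (acc : List (List Char)),
    PySem.Chars.splitOn.go sep fuel l cur acc = acc.reverse ++ PySem.Chars.splitOn.go sep fuel l cur [] := by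
  intro fuel
  induction fuel with
  | zero => intro l cur acc; simp [PySem.Chars.splitOn.go]
  | succ f ih =>
    intro l cur acc
    cases l with
    | nil => simp [PySem.Chars.splitOn.go]
    | cons c t =>
      simp only [PySem.Chars.splitOn.go]
      by_cases hp : List.isPrefixOf sep (c :: t) = true
      · simp only [hp, if_true]
        rw [ih _ _ (cur.reverse :: acc), ih _ _ [cur.reverse]]
        simp
      · simp only [hp]
        exact ih _ _ acc

-- the head of a single-char split is takeWhile
lemma pv_splitOn_head (ch : Char) (l : List Char) : ∀ (fuel : Nat) (cur : List Char), l.length ≤ fuel →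
    (PySem.Chars.splitOn.go [ch] fuel l cur []).headD [] = cur.reverse ++ l.takeWhile (fun c => c != ch) := by
  induction l with
  | nil =>
    intro fuel cur _
    cases fuel <;> simp [PySem.Chars.splitOn.go]
  | cons c t ih =>
    intro fuel cur h
    cases fuel with
    | zero => simp at h
    | succ f =>
      by_cases hc : c = ch
      · subst hc
        have hp : (List.isPrefixOf [c] (c :: t)) = true := by simp [List.isPrefixOf]
        simp only [PySem.Chars.splitOn.go, hp, if_true]
        rw [pv_splitOn_go_acc]
        simp [List.takeWhile]
      · have hp : (List.isPrefixOf [ch] (c :: t)) = false := by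
          simp [List.isPrefixOf]; intro h'; exact hc h'.symm
        simp only [PySem.Chars.splitOn.go, hp, Bool.false_eq_true, if_false]
        rw [ih f (c :: cur) (by simpa using h)]
        have hcb : (c != ch) = true := by simp [hc]
        simp [List.takeWhile, hcb]

lemma pv_split_head (l : List Char) (ch : Char) :
    ((PySem.Chars.splitOn l [ch]).headD []) = l.takeWhile (fun c => c != ch) := by
  simpa using pv_splitOn_head ch l (l.length + 1) [] (by omega)

-- the fused loop computes A's filter∘takeWhile∘takeWhile∘filter pipeline
lemma pv_loop_eq (l : List Char) :
    ((((l.filter (fun c => c != ' ')).takeWhile (fun c => c != '-')).takeWhile (fun c => c != '/')).filter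
      (fun ch => PySem.Chars.isalnum ch)) = pvAltLoop l := by
  induction l with
  | nil => simp [pvAltLoop]
  | cons c t ih =>
    by_cases hsp : c = ' '
    · subst hsp
      simpa [pvAltLoop, List.filter, PySem.Chars.isalnum, PySem.Chars.isalpha, PySem.Chars.isdigit] using ih
    · by_cases hd : c = '-'
      · subst hd; simp [pvAltLoop, List.filter]
      · by_cases hs : c = '/'
        · subst hs; simp [pvAltLoop, List.filter]
        · have hsp' : (c != ' ') = true := by simp [hsp]
          have hd' : (c != '-') = true := by simp [hd]
          have hs' : (c != '/') = true := by simp [hs]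
          by_cases ha : PySem.Chars.isalnum c = true <;>
            simp [pvAltLoop, hsp', hd', hs', hd, hs, ha, ih]

-- the whole A-side tail pipeline equals the fused loop
lemma pv_tail (texto : List Char) :
    String.mk (PySem.Chars.join [] (List.map (fun ch => [ch]) (List.filter (fun ch => PySem.Chars.isalnum ch)
      ((PySem.Chars.splitOn ((PySem.Chars.splitOn (PySem.Chars.replace texto [' '] []) ['-']).headD []) ['/']).headD []))))
    = String.mk (pvAltLoop texto) := by
  rw [pv_replace_space, pv_split_head, pv_split_head, PySem.Chars.join_nil_singletons, pv_loop_eq]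

-- ===== VERDICT (by name: the statement is the Claim_ definition above) =====
set_option maxHeartbeats 1600000 in
theorem normalizar_contrato_parceiro_c_py_spec : Claim_equal_normalizar_contrato_parceiro_c_py := by
  intro valor _
  unfold Spec_normalizar_contrato_parceiro_c_py
  cases valor with
  | none => rfl
  | some v =>
    simp only [normalizar_contrato_parceiro_c_py, normalizar_contrato_parceiro_c_py_alt]
    split_ifs
    · rfl
    · exact pv_tail _
    · exact pv_tail _
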